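-- pv_equiv track=rewrite | github.com/egavrin/devagent | ai_dev_agent/cli/react/plan_executor.py | _synthesize_final_message
-- ===== SOURCE A (Python) =====
-- def _synthesize_final_message(task_results: list) -> str:
--     """
--     Synthesize a final message from all task results.
--
--     Args:
--         task_results: List of task execution results
--
--     Returns:
--         Combined message string
--     """
--     messages = []
--     for i, task_result in enumerate(task_results, 1):
--         result_data = task_result.get("result", {})
--         final_msg = result_data.get("final_message", "")
--
--         if final_msg and final_msg.strip():
--             # Only include substantive results (skip empty or error messages)
--             if not final_msg.startswith("ERROR:") and len(final_msg.strip()) > 10: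
--                 messages.append(final_msg.strip())
--
--     if messages:
--         # If we have results, combine them intelligently
--         if len(messages) == 1:
--             return messages[0]
--         else:
--             # Combine multiple results with the last one typically being the most complete
--             return messages[-1]  # Return the final task's result as the answer
--     else:
--         return "All tasks completed successfully. No detailed results were generated."
-- ===== SOURCE B (Python) =====
-- def _synthesize_final_message(task_results: list) -> str:
--     # Scan from the end and return the first substantive message found
--     # (A always returns the last collected message, so no list is needed).
--     for task_result in reversed(task_results):
--         final_msg = task_result.get("result", {}).get("final_message", "")
--         stripped = final_msg.strip()
--         if stripped and not final_msg.startswith("ERROR:") and len(stripped) > 10: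
--             return stripped
--     return "All tasks completed successfully. No detailed results were generated."
-- ===== Notes on version B (the rewrite author's own statement) =====
-- stated objective: simpler
-- what changed: B scans the task results back-to-front and returns the first substantive message immediately, instead of accumulating a list of all valid messages and then indexing its last element.
import Mathlib
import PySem

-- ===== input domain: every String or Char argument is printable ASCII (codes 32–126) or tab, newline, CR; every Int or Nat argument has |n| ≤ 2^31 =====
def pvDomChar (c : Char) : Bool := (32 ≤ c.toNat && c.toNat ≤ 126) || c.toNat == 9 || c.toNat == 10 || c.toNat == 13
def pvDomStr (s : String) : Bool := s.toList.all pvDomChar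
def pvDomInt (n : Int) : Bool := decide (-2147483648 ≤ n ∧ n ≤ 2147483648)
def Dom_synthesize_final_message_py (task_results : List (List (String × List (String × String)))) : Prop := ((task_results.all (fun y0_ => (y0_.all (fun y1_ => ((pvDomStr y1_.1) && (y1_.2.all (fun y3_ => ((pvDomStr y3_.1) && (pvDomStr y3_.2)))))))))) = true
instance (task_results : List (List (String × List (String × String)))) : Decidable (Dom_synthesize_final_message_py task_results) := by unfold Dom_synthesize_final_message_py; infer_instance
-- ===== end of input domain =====

-- B scans the task results back-to-front and returns the first substantive message
-- immediately, instead of collecting all valid messages and taking the last (objective: simpler).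


-- ===== PORT A =====
def synthesize_final_message_py (task_results : List (List (String × List (String × String)))) : String :=
  let messages := task_results.foldl (fun acc task_result =>
    let result_data := PySem.Dict.getD (PySem.Dict.mk task_result) "result" []
    let final_msg := PySem.Dict.getD (PySem.Dict.mk result_data) "final_message" ""
    if final_msg ≠ "" ∧ PySem.Str.strip final_msg ≠ "" then
      if ¬ (PySem.Str.startswith final_msg "ERROR:" = true) ∧ PySem.Str.len (PySem.Str.strip final_msg) > 10 then
        acc ++ [PySem.Str.strip final_msg]
      else acc
    else acc) []
  if messages ≠ [] then
    if messages.length = 1 then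
      (PySem.List.pyGet? messages 0).getD ""      -- messages[0]; in range since messages ≠ []
    else
      (PySem.List.pyGet? messages (-1)).getD ""   -- messages[-1]; in range since messages ≠ []
  else "All tasks completed successfully. No detailed results were generated."

-- ===== PORT B =====
def sfm_alt_loop : List (List (String × List (String × String))) → String
  | [] => "All tasks completed successfully. No detailed results were generated."
  | task_result :: rest =>
    let final_msg := PySem.Dict.getD (PySem.Dict.mk (PySem.Dict.getD (PySem.Dict.mk task_result) "result" [])) "final_message" ""
    let stripped := PySem.Str.strip final_msg
    if stripped ≠ "" ∧ ¬ (PySem.Str.startswith final_msg "ERROR:" = true) ∧ PySem.Str.len stripped > 10 then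
      stripped
    else sfm_alt_loop rest

def synthesize_final_message_py_alt (task_results : List (List (String × List (String × String)))) : String :=
  sfm_alt_loop task_results.reverse

-- ===== PRECONDITION & SPEC =====
def Spec_synthesize_final_message_py (task_results : List (List (String × List (String × String)))) (out : String) : Prop := out = synthesize_final_message_py_alt task_results
instance (task_results : List (List (String × List (String × String)))) (out : String) : Decidable (Spec_synthesize_final_message_py task_results out) := by unfold Spec_synthesize_final_message_py; infer_instance

-- ===== CLAIM (what is proved, stated in full; the proofs are below) =====
def Claim_equal_synthesize_final_message_py : Prop := ∀ (task_results : List (List (String × List (String × String)))), Dom_synthesize_final_message_py task_results → Spec_synthesize_final_message_py task_results (synthesize_final_message_py task_results)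

-- ===== LEMMAS AND PROOFS =====

-- the extracted message of one task_result
def sfm_msg (task_result : List (String × List (String × String))) : String :=
  PySem.Dict.getD (PySem.Dict.mk (PySem.Dict.getD (PySem.Dict.mk task_result) "result" [])) "final_message" ""

-- B's acceptance test (as a Bool)
def sfm_ok (task_result : List (String × List (String × String))) : Bool :=
  let fm := sfm_msg task_result
  decide (PySem.Str.strip fm ≠ "" ∧ ¬ (PySem.Str.startswith fm "ERROR:" = true) ∧ PySem.Str.len (PySem.Str.strip fm) > 10)

theorem strip_empty_of_empty (s : String) (h : s = "") : PySem.Str.strip s = "" := by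
  subst h; decide

-- A's nested test collapses to B's single test
theorem sfm_cond_collapse (fm : String) (acc : List String) :
    (if fm ≠ "" ∧ PySem.Str.strip fm ≠ "" then
       if ¬ (PySem.Str.startswith fm "ERROR:" = true) ∧ PySem.Str.len (PySem.Str.strip fm) > 10 then
         acc ++ [PySem.Str.strip fm]
       else acc
     else acc)
    = if (decide (PySem.Str.strip fm ≠ "" ∧ ¬ (PySem.Str.startswith fm "ERROR:" = true) ∧ PySem.Str.len (PySem.Str.strip fm) > 10)) = true
      then acc ++ [PySem.Str.strip fm] else acc := by
  by_cases hs : PySem.Str.strip fm = ""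
  · rw [if_neg (fun h => h.2 hs), if_neg (by simp [hs])]
  · have hfm : fm ≠ "" := fun h => hs (strip_empty_of_empty fm h)
    by_cases hc : ¬ (PySem.Str.startswith fm "ERROR:" = true) ∧ PySem.Str.len (PySem.Str.strip fm) > 10
    · rw [if_pos ⟨hfm, hs⟩, if_pos hc, if_pos (decide_eq_true ⟨hs, hc⟩)]
    · rw [if_pos ⟨hfm, hs⟩, if_neg hc, if_neg (by simp only [decide_eq_true_eq]; exact fun h => hc h.2)]

theorem sfm_messages_eq (l : List (List (String × List (String × String)))) :
    l.foldl (fun acc task_result =>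
      let result_data := PySem.Dict.getD (PySem.Dict.mk task_result) "result" []
      let final_msg := PySem.Dict.getD (PySem.Dict.mk result_data) "final_message" ""
      if final_msg ≠ "" ∧ PySem.Str.strip final_msg ≠ "" then
        if ¬ (PySem.Str.startswith final_msg "ERROR:" = true) ∧ PySem.Str.len (PySem.Str.strip final_msg) > 10 then
          acc ++ [PySem.Str.strip final_msg]
        else acc
      else acc) []
    = (l.filter sfm_ok).map (fun tr => PySem.Str.strip (sfm_msg tr)) := by
  have hfun : (fun (acc : List String) task_result =>
      let result_data := PySem.Dict.getD (PySem.Dict.mk task_result) "result" []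
      let final_msg := PySem.Dict.getD (PySem.Dict.mk result_data) "final_message" ""
      if final_msg ≠ "" ∧ PySem.Str.strip final_msg ≠ "" then
        if ¬ (PySem.Str.startswith final_msg "ERROR:" = true) ∧ PySem.Str.len (PySem.Str.strip final_msg) > 10 then
          acc ++ [PySem.Str.strip final_msg]
        else acc
      else acc)
      = (fun acc tr => if sfm_ok tr then acc ++ [PySem.Str.strip (sfm_msg tr)] else acc) := by
    funext acc tr
    exact sfm_cond_collapse (sfm_msg tr) acc
  rw [hfun, PySem.List.foldl_append_if]
  simp

theorem sfm_loop_eq (l : List (List (String × List (String × String)))) :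
    sfm_alt_loop l = ((l.filter sfm_ok).map (fun tr => PySem.Str.strip (sfm_msg tr))).headD
      "All tasks completed successfully. No detailed results were generated." := by
  induction l with
  | nil => rfl
  | cons x xs ih =>
    rw [sfm_alt_loop, List.filter_cons]
    by_cases h : sfm_ok x
    · rw [if_pos h, if_pos (by simpa [sfm_ok, sfm_msg] using h)]
      rfl
    · rw [if_neg h, if_neg (by simpa [sfm_ok, sfm_msg] using h)]
      exact ih

-- A's final indexing equals head-of-reverse
theorem sfm_tail_eq (m : List String) :
    (if m ≠ [] then
      if m.length = 1 then (PySem.List.pyGet? m 0).getD "" else (PySem.List.pyGet? m (-1)).getD ""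
     else "All tasks completed successfully. No detailed results were generated.")
    = m.reverse.headD "All tasks completed successfully. No detailed results were generated." := by
  match m with
  | [] => rfl
  | [a] => simp [PySem.List.pyGet?, PySem.List.pyIdx?]
  | a :: b :: t =>
    rw [if_pos (by simp), if_neg (by simp), PySem.List.pyGet?_neg_one,
      List.headD_eq_head?_getD, List.head?_reverse]
    cases h : (a :: b :: t).getLast? with
    | none => simp at h
    | some v => rfl

-- ===== VERDICT (by name: the statement is the Claim_ definition above) =====
theorem synthesize_final_message_py_spec : Claim_equal_synthesize_final_message_py := by
  intro l _
  unfold Spec_synthesize_final_message_py synthesize_final_message_py synthesize_final_message_py_alt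
  rw [sfm_messages_eq, sfm_tail_eq, sfm_loop_eq, List.filter_reverse, List.map_reverse]
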